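-- pv_equiv track=rewrite | github.com/nakitamray/apero | py/upload_history.py | analyze_dish
-- ===== SOURCE A (Python) =====
-- def analyze_dish(name):
--     name_lower = name.lower()
--     tags = []
--     if any(x in name_lower for x in ['soup', 'mac', 'pasta', 'stew', 'chili', 'mashed']): tags.append('cozy')
--     if any(x in name_lower for x in ['soup', 'broth', 'toast', 'tea', 'cracker']): tags.append('sick')
--     if any(x in name_lower for x in ['salad', 'grilled', 'vegetable', 'fruit', 'tofu', 'vegan']): tags.append('healthy')
--     if any(x in name_lower for x in ['spicy', 'buffalo', 'jalapeno', 'cajun', 'curry']): tags.append('spicy')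
--     if any(x in name_lower for x in ['cookie', 'cake', 'brownie', 'pie', 'chocolate']): tags.append('sweet')
--     if any(x in name_lower for x in ['chicken', 'beef', 'steak', 'turkey', 'fish', 'egg']): tags.append('protein')
--     return tags
-- ===== SOURCE B (Python) =====
-- KEYWORD_TAGS = {
--     'soup': ['cozy', 'sick'],
--     'mac': ['cozy'], 'pasta': ['cozy'], 'stew': ['cozy'], 'chili': ['cozy'], 'mashed': ['cozy'],
--     'broth': ['sick'], 'toast': ['sick'], 'tea': ['sick'], 'cracker': ['sick'],
--     'salad': ['healthy'], 'grilled': ['healthy'], 'vegetable': ['healthy'],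
--     'fruit': ['healthy'], 'tofu': ['healthy'], 'vegan': ['healthy'],
--     'spicy': ['spicy'], 'buffalo': ['spicy'], 'jalapeno': ['spicy'], 'cajun': ['spicy'], 'curry': ['spicy'],
--     'cookie': ['sweet'], 'cake': ['sweet'], 'brownie': ['sweet'], 'pie': ['sweet'], 'chocolate': ['sweet'],
--     'chicken': ['protein'], 'beef': ['protein'], 'steak': ['protein'],
--     'turkey': ['protein'], 'fish': ['protein'], 'egg': ['protein'],
-- }
-- TAG_ORDER = ['cozy', 'sick', 'healthy', 'spicy', 'sweet', 'protein']
--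
-- def analyze_dish(name):
--     nl = name.lower()
--     hit = set()
--     for i in range(len(nl)):
--         for kw, ts in KEYWORD_TAGS.items():
--             if nl.startswith(kw, i):
--                 hit.update(ts)
--     return [t for t in TAG_ORDER if t in hit]
-- ===== Notes on version B (the rewrite author's own statement) =====
-- stated objective: alternative
-- what changed: A runs six independent any-substring tests over per-tag keyword lists; B scans the lowered name once position by position, matching keywords from an inverted keyword-to-tags index at each position into a set, then emits the fixed tag order filtered by that set.
import Mathlib
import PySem

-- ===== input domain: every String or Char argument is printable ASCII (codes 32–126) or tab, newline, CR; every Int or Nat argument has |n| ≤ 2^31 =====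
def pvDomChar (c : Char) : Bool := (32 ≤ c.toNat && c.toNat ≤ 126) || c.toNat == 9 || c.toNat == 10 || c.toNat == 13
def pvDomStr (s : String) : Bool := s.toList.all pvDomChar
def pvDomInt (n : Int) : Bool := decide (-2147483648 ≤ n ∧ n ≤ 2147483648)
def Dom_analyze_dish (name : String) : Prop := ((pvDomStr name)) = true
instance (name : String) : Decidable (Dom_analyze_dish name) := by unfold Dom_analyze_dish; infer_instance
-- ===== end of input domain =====

-- B replaces A's six per-tag substring tests with one left-to-right scan of the lowered
-- name: at every position it looks up which keywords start there (inverted keyword→tags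
-- index), collects the matched tags in a set, and finally emits the fixed tag order.
-- Objective: alternative algorithm, same behaviour.

-- ===== PORT A =====
def analyze_dish (name : String) : List String :=
  let name_lower := PySem.Str.lower name
  let tags : List String := []
  let tags := if (["soup", "mac", "pasta", "stew", "chili", "mashed"].any
      fun x => PySem.Str.isIn x name_lower) then tags ++ ["cozy"] else tags
  let tags := if (["soup", "broth", "toast", "tea", "cracker"].any
      fun x => PySem.Str.isIn x name_lower) then tags ++ ["sick"] else tags
  let tags := if (["salad", "grilled", "vegetable", "fruit", "tofu", "vegan"].any
      fun x => PySem.Str.isIn x name_lower) then tags ++ ["healthy"] else tags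
  let tags := if (["spicy", "buffalo", "jalapeno", "cajun", "curry"].any
      fun x => PySem.Str.isIn x name_lower) then tags ++ ["spicy"] else tags
  let tags := if (["cookie", "cake", "brownie", "pie", "chocolate"].any
      fun x => PySem.Str.isIn x name_lower) then tags ++ ["sweet"] else tags
  let tags := if (["chicken", "beef", "steak", "turkey", "fish", "egg"].any
      fun x => PySem.Str.isIn x name_lower) then tags ++ ["protein"] else tags
  tags

-- ===== PORT B =====
-- KEYWORD_TAGS: the inverted index keyword → tags (a dict in Source B; association list here)
def kwTags : List (String × List String) :=
  [ ("soup", ["cozy", "sick"]),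
    ("mac", ["cozy"]), ("pasta", ["cozy"]), ("stew", ["cozy"]), ("chili", ["cozy"]), ("mashed", ["cozy"]),
    ("broth", ["sick"]), ("toast", ["sick"]), ("tea", ["sick"]), ("cracker", ["sick"]),
    ("salad", ["healthy"]), ("grilled", ["healthy"]), ("vegetable", ["healthy"]),
    ("fruit", ["healthy"]), ("tofu", ["healthy"]), ("vegan", ["healthy"]),
    ("spicy", ["spicy"]), ("buffalo", ["spicy"]), ("jalapeno", ["spicy"]), ("cajun", ["spicy"]), ("curry", ["spicy"]),
    ("cookie", ["sweet"]), ("cake", ["sweet"]), ("brownie", ["sweet"]), ("pie", ["sweet"]), ("chocolate", ["sweet"]),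
    ("chicken", ["protein"]), ("beef", ["protein"]), ("steak", ["protein"]),
    ("turkey", ["protein"]), ("fish", ["protein"]), ("egg", ["protein"]) ]

def tagOrder : List String := ["cozy", "sick", "healthy", "spicy", "sweet", "protein"]

-- the scan loop of Source B: for i in range(len(nl)): for kw, ts in KEYWORD_TAGS.items():
--   if nl.startswith(kw, i): hit.update(ts)
-- nl.startswith(kw, i) with 0 ≤ i < len(nl) is ported exactly as startswith on nl.drop i.
def scanHits (nl : List Char) : PySem.Set String :=
  (PySem.List.pyRange 0 (nl.length : Int) 1).foldl
    (fun s i => kwTags.foldl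
      (fun s p => if PySem.Chars.startswith (nl.drop i.toNat) p.1.toList
                  then PySem.Set.update s p.2 else s) s)
    PySem.Set.empty

def analyze_dish_alt (name : String) : List String :=
  let nl := (PySem.Str.lower name).toList
  let hit := scanHits nl
  tagOrder.filter (fun t => PySem.Set.contains hit t)

-- ===== PRECONDITION & SPEC =====
def Spec_analyze_dish (name : String) (out : List String) : Prop := out = analyze_dish_alt name
instance (name : String) (out : List String) : Decidable (Spec_analyze_dish name out) := by unfold Spec_analyze_dish; infer_instance

-- ===== CLAIM (what is proved, stated in full; the proofs are below) =====
def Claim_equal_analyze_dish : Prop := ∀ (name : String), Dom_analyze_dish name → Spec_analyze_dish name (analyze_dish name)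

-- ===== LEMMAS AND PROOFS =====

-- membership after the inner loop over the keyword index
lemma mem_innerFold (c : List Char) (m : List (String × List String)) (s0 : PySem.Set String) (t : String) :
    t ∈ m.foldl (fun s p => if PySem.Chars.startswith c p.1.toList
                            then PySem.Set.update s p.2 else s) s0 ↔
    t ∈ s0 ∨ ∃ p ∈ m, PySem.Chars.startswith c p.1.toList = true ∧ t ∈ p.2 := by
  induction m generalizing s0 with
  | nil => simp
  | cons p m ih =>
    rw [List.foldl_cons, ih]
    by_cases h : PySem.Chars.startswith c p.1.toList = true
    · simp [h, PySem.Set.mem_update]; try tauto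
    · simp [h]; try tauto

-- membership after the whole position scan
lemma mem_outerFold (nl : List Char) (l : List Int) (s0 : PySem.Set String) (t : String) :
    t ∈ l.foldl (fun s i => kwTags.foldl
        (fun s p => if PySem.Chars.startswith (nl.drop i.toNat) p.1.toList
                    then PySem.Set.update s p.2 else s) s) s0 ↔
    t ∈ s0 ∨ ∃ i ∈ l, ∃ p ∈ kwTags,
        PySem.Chars.startswith (nl.drop i.toNat) p.1.toList = true ∧ t ∈ p.2 := by
  induction l generalizing s0 with
  | nil => simp
  | cons i l ih =>
    rw [List.foldl_cons, ih, mem_innerFold]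
    simp only [List.mem_cons]
    constructor
    · rintro (⟨h | ⟨p, hp, hsw, ht⟩⟩ | ⟨j, hj, h⟩)
      · exact Or.inl h
      · exact Or.inr ⟨i, Or.inl rfl, p, hp, hsw, ht⟩
      · exact Or.inr ⟨j, Or.inr hj, h⟩
    · rintro (h | ⟨j, (rfl | hj), h⟩)
      · exact Or.inl (Or.inl h)
      · exact Or.inl (Or.inr h)
      · exact Or.inr ⟨j, hj, h⟩

-- a nonempty keyword starts at some scanned position iff it is a substring
lemma startsAt_iff_infix (kw nl : List Char) (hkw : kw ≠ []) :
    (∃ i ∈ PySem.List.pyRange 0 (nl.length : Int) 1,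
        PySem.Chars.startswith (nl.drop i.toNat) kw = true) ↔ kw <:+: nl := by
  constructor
  · rintro ⟨i, _, hsw⟩
    exact (PySem.Chars.isIn_iff_infix kw nl).mp
      ((PySem.Chars.exists_prefix_drop_iff_isIn kw nl).mp
        ⟨i.toNat, (PySem.Chars.startswith_iff _ _).mp hsw⟩)
  · intro hinf
    obtain ⟨j, hj⟩ := (PySem.Chars.exists_prefix_drop_iff_isIn kw nl).mpr
      ((PySem.Chars.isIn_iff_infix kw nl).mpr hinf)
    have hjlt : j < nl.length := by
      by_contra hle
      have : nl.drop j = [] := List.drop_eq_nil_of_le (by omega)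
      rw [this] at hj
      exact hkw (List.prefix_nil.mp hj)
    refine ⟨(j : Int), ?_, ?_⟩
    · rw [PySem.List.mem_pyRange_one]; omega
    · rw [PySem.Chars.startswith_iff]; simpa using hj

lemma kwTags_nonempty : ∀ p ∈ kwTags, p.1.toList ≠ [] := by decide

lemma contains_scanHits (nl : List Char) (t : String) :
    PySem.Set.contains (scanHits nl) t = true ↔
    ∃ p ∈ kwTags, t ∈ p.2 ∧ p.1.toList <:+: nl := by
  rw [PySem.Set.contains_iff]
  unfold scanHits
  rw [mem_outerFold]
  constructor
  · rintro (h | ⟨i, hi, p, hp, hsw, ht⟩)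
    · simp [PySem.Set.empty] at h
    · exact ⟨p, hp, ht, (startsAt_iff_infix _ nl (kwTags_nonempty p hp)).mp ⟨i, hi, hsw⟩⟩
  · rintro ⟨p, hp, ht, hinf⟩
    obtain ⟨i, hi, hsw⟩ := (startsAt_iff_infix _ nl (kwTags_nonempty p hp)).mpr hinf
    exact Or.inr ⟨i, hi, p, hp, hsw, ht⟩

-- the scan set agrees with A's per-tag any-substring test
lemma tag_cond (s : String) (t : String) (K : List String)
    (hiff : ∀ cs : List Char,
      (∃ p ∈ kwTags, t ∈ p.2 ∧ p.1.toList <:+: cs) ↔ ∃ x ∈ K, x.toList <:+: cs) :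
    PySem.Set.contains (scanHits s.toList) t = K.any (fun x => PySem.Str.isIn x s) := by
  rw [Bool.eq_iff_iff, contains_scanHits, hiff]
  simp [List.any_eq_true, PySem.Chars.isIn_iff_infix]

-- ===== VERDICT (by name: the statement is the Claim_ definition above) =====
set_option maxHeartbeats 1000000 in
theorem analyze_dish_spec : Claim_equal_analyze_dish := by
  intro name _
  unfold Spec_analyze_dish
  have h1 := tag_cond (PySem.Str.lower name) "cozy"
    ["soup", "mac", "pasta", "stew", "chili", "mashed"] (by intro cs; simp [kwTags]; try tauto)
  have h2 := tag_cond (PySem.Str.lower name) "sick"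
    ["soup", "broth", "toast", "tea", "cracker"] (by intro cs; simp [kwTags]; try tauto)
  have h3 := tag_cond (PySem.Str.lower name) "healthy"
    ["salad", "grilled", "vegetable", "fruit", "tofu", "vegan"] (by intro cs; simp [kwTags]; try tauto)
  have h4 := tag_cond (PySem.Str.lower name) "spicy"
    ["spicy", "buffalo", "jalapeno", "cajun", "curry"] (by intro cs; simp [kwTags]; try tauto)
  have h5 := tag_cond (PySem.Str.lower name) "sweet"
    ["cookie", "cake", "brownie", "pie", "chocolate"] (by intro cs; simp [kwTags]; try tauto)
  have h6 := tag_cond (PySem.Str.lower name) "protein"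
    ["chicken", "beef", "steak", "turkey", "fish", "egg"] (by intro cs; simp [kwTags]; try tauto)
  unfold analyze_dish analyze_dish_alt tagOrder
  simp only [List.filter_cons, List.filter_nil, h1, h2, h3, h4, h5, h6]
  split_ifs <;> rfl
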